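-- pv_equiv track=rewrite | github.com/ABHIVEDI11/DNA_READ | 06_consecutive_runs.py | find_consecutive_runs
-- ===== SOURCE A (Python) =====
-- def find_consecutive_runs(data, pattern):
--     # Initialize an empty list to store runs
--     runs = []
--     # Initialize index variable
--     i = 0
--     # Loop through the data
--     '''At the beginning of the loop, i is initialized to 0.
--     The condition i < len(data) is checked.
--     If i is less than the length of the data string, the loop body executes.
--     If i is equal to or greater than the length of the data string, the loop terminates.'''
--     while i < len(data):
--         # Check if the substring matches the pattern
--         if data[i:i + len(pattern)] == pattern:
--             # Store the start of the run
--             run_start = i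
--             # Move index forward as long as the pattern matches
--             while i < len(data) and data[i:i + len(pattern)] == pattern:
--                 i += len(pattern)
--             # Append the start and end of the run to the list
--             runs.append((run_start, i - 1))  # Corrected end index to i - 1
--         else:
--             # Move to the next character if no match
--             i += 1
--     return runs
-- ===== SOURCE B (Python) =====
-- def find_consecutive_runs(data, pattern):
--     # Precompute all occurrence positions once, then scan the match list:
--     # each run is a maximal chain of matches spaced len(pattern) apart.
--     n, m = len(data), len(pattern)
--     matches = [i for i in range(n) if data[i:i + m] == pattern]
--     ms = set(matches)
--     runs = []
--     t = 0  # everything before t is already consumed by an earlier run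
--     for p in matches:
--         if p < t:
--             continue
--         j = p
--         while j in ms:
--             j += m
--         runs.append((p, j - 1))
--         t = j
--     return runs
-- ===== Notes on version B (the rewrite author's own statement) =====
-- stated objective: alternative
-- what changed: B precomputes the list/set of all pattern occurrence positions in one pass and then forms runs by chaining positions spaced len(pattern) apart over that match list, instead of A's single char-by-char scan with substring comparisons interleaved into nested while loops; Pre_ only excludes pattern == '' with non-empty data, where A loops forever.
import Mathlib
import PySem

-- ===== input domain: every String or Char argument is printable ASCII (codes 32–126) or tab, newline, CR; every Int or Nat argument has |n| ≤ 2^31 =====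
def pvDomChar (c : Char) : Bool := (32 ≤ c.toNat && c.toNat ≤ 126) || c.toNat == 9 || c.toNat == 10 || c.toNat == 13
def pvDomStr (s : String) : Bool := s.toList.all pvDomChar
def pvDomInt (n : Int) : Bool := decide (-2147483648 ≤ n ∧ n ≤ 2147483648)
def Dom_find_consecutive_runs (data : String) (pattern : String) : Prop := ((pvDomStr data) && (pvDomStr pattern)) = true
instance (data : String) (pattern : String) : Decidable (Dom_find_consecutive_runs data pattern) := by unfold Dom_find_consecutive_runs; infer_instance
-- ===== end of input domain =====

-- B builds the list/set of all occurrence positions first and chains them into runs,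
-- instead of A's char-by-char scan with nested while loops (objective: alternative).

-- ===== PORT A =====
-- data[i:i+len(pattern)] == pattern
def pvMatchAt (d p : List Char) (i : Nat) : Bool :=
  PySem.List.slice d (some (i : Int)) (some ((i : Int) + (p.length : Int))) == p

-- inner while: 'while i < len(data) and data[i:i+len(pattern)] == pattern: i += len(pattern)'
-- fuel: with pattern ≠ "", i grows by ≥ 1 per step while i < len(data), so len(data)+1 suffices
def pvInnerA (d p : List Char) (i fuel : Nat) : Nat :=
  match fuel with
  | 0 => i
  | f + 1 => if i < d.length && pvMatchAt d p i then pvInnerA d p (i + p.length) f else i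

-- outer while over the data; fuel as above
def pvLoopA (d p : List Char) (i : Nat) (runs : List (Int × Int)) (fuel : Nat) : List (Int × Int) :=
  match fuel with
  | 0 => runs
  | f + 1 =>
    if i < d.length then
      if pvMatchAt d p i then
        let j := pvInnerA d p i (d.length + 1)
        pvLoopA d p j (runs ++ [((i : Int), (j : Int) - 1)]) f
      else
        pvLoopA d p (i + 1) runs f
    else runs

def find_consecutive_runs (data : String) (pattern : String) : List (Int × Int) :=
  pvLoopA data.toList pattern.toList 0 [] (data.toList.length + 1)

-- ===== PORT B =====
-- matches = [i for i in range(n) if data[i:i+m] == pattern]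
def pvMatches (d p : List Char) : List Nat :=
  (List.range d.length).filter (fun i => pvMatchAt d p i)

-- 'while j in ms: j += m'; fuel: j grows by m ≥ 1 while j ∈ ms, so len(data)+1 suffices
def pvInnerB (ms : PySem.Set Nat) (m j fuel : Nat) : Nat :=
  match fuel with
  | 0 => j
  | f + 1 => if j ∈ ms then pvInnerB ms m (j + m) f else j

-- loop body of 'for p in matches'
def pvStepB (ms : PySem.Set Nat) (m fuel : Nat) (st : List (Int × Int) × Nat) (p : Nat) :
    List (Int × Int) × Nat :=
  if p < st.2 then st
  else
    let j := pvInnerB ms m p fuel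
    (st.1 ++ [((p : Int), (j : Int) - 1)], j)

def find_consecutive_runs_alt (data : String) (pattern : String) : List (Int × Int) :=
  let d := data.toList
  let m := pattern.toList.length
  let occ := pvMatches d pattern.toList
  let ms := PySem.Set.ofList occ
  (occ.foldl (pvStepB ms m (d.length + 1)) ([], 0)).1

-- ===== PRECONDITION & SPEC =====
-- Pre_ excludes only pattern = "" with data ≠ "": there A's loops advance i by 0 and never terminate.
def Pre_find_consecutive_runs (data : String) (pattern : String) : Prop :=
  pattern ≠ "" ∨ data = ""
instance (data : String) (pattern : String) : Decidable (Pre_find_consecutive_runs data pattern) := by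
  unfold Pre_find_consecutive_runs; infer_instance

def pvWitness_find_consecutive_runs : String × String := ("abab", "ab")

def Spec_find_consecutive_runs (data : String) (pattern : String) (out : List (Int × Int)) : Prop := out = find_consecutive_runs_alt data pattern
instance (data : String) (pattern : String) (out : List (Int × Int)) : Decidable (Spec_find_consecutive_runs data pattern out) := by unfold Spec_find_consecutive_runs; infer_instance

-- ===== CLAIM (what is proved, stated in full; the proofs are below) =====
def Claim_equal_find_consecutive_runs : Prop := ∀ (data : String) (pattern : String), Dom_find_consecutive_runs data pattern → Pre_find_consecutive_runs data pattern → Spec_find_consecutive_runs data pattern (find_consecutive_runs data pattern)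

-- ===== LEMMAS AND PROOFS =====

-- proof-only: the sub-list of match positions ≥ k, in increasing order
def msFrom (d p : List Char) (k : Nat) : List Nat :=
  (List.range d.length).filter (fun x => pvMatchAt d p x && decide (k ≤ x))

theorem mem_pvMatches (d p : List Char) (x : Nat) :
    x ∈ pvMatches d p ↔ x < d.length ∧ pvMatchAt d p x = true := by
  simp [pvMatches, List.mem_filter, List.mem_range, and_comm]

theorem msFrom_zero (d p : List Char) : msFrom d p 0 = pvMatches d p := by
  simp [msFrom, pvMatches]

theorem msFrom_nil (d p : List Char) (k : Nat) (h : d.length ≤ k) : msFrom d p k = [] := by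
  refine List.filter_eq_nil_iff.mpr ?_
  intro x hx
  simp only [List.mem_range] at hx
  simp [Nat.not_le.mpr (Nat.lt_of_lt_of_le hx h)]

theorem range_filter_split (n j : Nat) (q : Nat → Bool) :
    (List.range n).filter q =
      ((List.range n).filter (fun x => q x && decide (x < j))) ++
      ((List.range n).filter (fun x => q x && decide (j ≤ x))) := by
  induction n with
  | zero => rfl
  | succ n ih =>
    rw [List.range_succ, List.filter_append, List.filter_append, List.filter_append, ih]
    by_cases hj : j ≤ n
    · have h2 : (List.filter (fun x => q x && decide (x < j)) [n]) = [] := by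
        simp [List.filter, Nat.not_lt.mpr hj]
      have h3 : (List.filter (fun x => q x && decide (j ≤ x)) [n]) = List.filter q [n] := by
        simp [List.filter, hj]
      rw [h2, h3, List.append_nil, List.append_assoc]
    · have hn : n < j := Nat.not_le.mp hj
      have h2 : ((List.range n).filter (fun x => q x && decide (j ≤ x))) = [] := by
        refine List.filter_eq_nil_iff.mpr ?_
        intro x hx
        simp only [List.mem_range] at hx
        simp [Nat.not_le.mpr (Nat.lt_trans hx hn)]
      have h3 : (List.filter (fun x => q x && decide (x < j)) [n]) = List.filter q [n] := by
        simp [List.filter, hn]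
      have h4 : (List.filter (fun x => q x && decide (j ≤ x)) [n]) = [] := by
        simp [List.filter, Nat.not_le.mpr hn]
      rw [h2, h3, h4, List.append_nil, List.append_nil, List.append_assoc]
      simp

theorem msFrom_split (d p : List Char) (k j : Nat) (hkj : k ≤ j) :
    msFrom d p k =
      ((List.range d.length).filter (fun x => (pvMatchAt d p x && decide (k ≤ x)) && decide (x < j))) ++
      msFrom d p j := by
  rw [msFrom, range_filter_split d.length j (fun x => pvMatchAt d p x && decide (k ≤ x))]
  congr 1
  apply List.filter_congr
  intro x _
  by_cases hj : j ≤ x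
  · simp [hj, Nat.le_trans hkj hj]
  · simp [hj]

theorem msFrom_step_nomatch (d p : List Char) (i : Nat) (hP : pvMatchAt d p i = false) :
    msFrom d p i = msFrom d p (i + 1) := by
  apply List.filter_congr
  intro x _
  by_cases hxi : x = i
  · subst hxi; simp [hP]
  · by_cases h : i ≤ x
    · have : i + 1 ≤ x := by omega
      simp [h, this]
    · have : ¬ i + 1 ≤ x := by omega
      simp [h, this]

theorem msFrom_cons (d p : List Char) (i : Nat) (hi : i < d.length) (hP : pvMatchAt d p i = true) :
    msFrom d p i = i :: msFrom d p (i + 1) := by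
  rw [msFrom_split d p i (i + 1) (Nat.le_succ i)]
  have hhead : ((List.range d.length).filter
      (fun x => (pvMatchAt d p x && decide (i ≤ x)) && decide (x < i + 1))) = [i] := by
    have hr : d.length = i + 1 + (d.length - (i + 1)) := by omega
    rw [hr, List.range_add, List.filter_append, List.range_succ, List.filter_append]
    have e1 : ((List.range i).filter
        (fun x => (pvMatchAt d p x && decide (i ≤ x)) && decide (x < i + 1))) = [] := by
      refine List.filter_eq_nil_iff.mpr ?_
      intro x hx
      simp only [List.mem_range] at hx
      simp [Nat.not_le.mpr hx]
    have e2 : (List.filter (fun x => (pvMatchAt d p x && decide (i ≤ x)) && decide (x < i + 1)) [i]) = [i] := by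
      simp [List.filter, hP]
    have e3 : (((List.range (d.length - (i + 1))).map (i + 1 + ·)).filter
        (fun x => (pvMatchAt d p x && decide (i ≤ x)) && decide (x < i + 1))) = [] := by
      refine List.filter_eq_nil_iff.mpr ?_
      intro x hx
      simp only [List.mem_map, List.mem_range] at hx
      obtain ⟨a, _, rfl⟩ := hx
      simp [Nat.not_lt.mpr (by omega : i + 1 ≤ i + 1 + a)]
    rw [e1, e2, e3]
    rfl
  rw [hhead]
  rfl

theorem mem_msFrom (d p : List Char) (k x : Nat) (h : x ∈ msFrom d p k) : k ≤ x := by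
  simp only [msFrom, List.mem_filter, Bool.and_eq_true, decide_eq_true_eq] at h
  exact h.2.2

theorem pvInnerA_ge (d p : List Char) : ∀ fuel i, i ≤ pvInnerA d p i fuel := by
  intro fuel
  induction fuel with
  | zero => intro i; simp [pvInnerA]
  | succ f ih =>
    intro i
    simp only [pvInnerA]
    split
    · exact Nat.le_trans (Nat.le_add_right i p.length) (ih (i + p.length))
    · exact Nat.le_refl i

theorem pvInnerB_eq_pvInnerA (d p : List Char) : ∀ fuel j,
    pvInnerB (PySem.Set.ofList (pvMatches d p)) p.length j fuel = pvInnerA d p j fuel := by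
  intro fuel
  induction fuel with
  | zero => intro j; rfl
  | succ f ih =>
    intro j
    have hc : (j ∈ PySem.Set.ofList (pvMatches d p)) ↔ (j < d.length && pvMatchAt d p j) = true := by
      rw [PySem.Set.mem_ofList, mem_pvMatches]
      simp
    simp only [pvInnerA, pvInnerB]
    by_cases h : j ∈ PySem.Set.ofList (pvMatches d p)
    · rw [if_pos h, if_pos (hc.mp h), ih]
    · rw [if_neg h, if_neg (fun hb => h (hc.mpr hb))]

theorem foldl_pvStepB_skip (ms : PySem.Set Nat) (m F : Nat) :
    ∀ (l : List Nat) (st : List (Int × Int) × Nat), (∀ x ∈ l, x < st.2) →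
      List.foldl (pvStepB ms m F) st l = st := by
  intro l
  induction l with
  | nil => intro st _; rfl
  | cons a l ih =>
    intro st h
    simp only [List.foldl_cons]
    rw [show pvStepB ms m F st a = st from by simp [pvStepB, h a (List.mem_cons_self)]]
    exact ih st (fun x hx => h x (List.mem_cons_of_mem a hx))

theorem foldl_pvStepB_t_irrel (ms : PySem.Set Nat) (m F : Nat)
    (l : List Nat) (runs : List (Int × Int)) (t1 t2 : Nat)
    (h1 : ∀ x ∈ l, t1 ≤ x) (h2 : ∀ x ∈ l, t2 ≤ x) :
    (List.foldl (pvStepB ms m F) (runs, t1) l).1 = (List.foldl (pvStepB ms m F) (runs, t2) l).1 := by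
  cases l with
  | nil => rfl
  | cons a l =>
    simp only [List.foldl_cons]
    have e1 : pvStepB ms m F (runs, t1) a = (runs ++ [((a : Int), (pvInnerB ms m a F : Int) - 1)], pvInnerB ms m a F) := by
      simp [pvStepB, Nat.not_lt.mpr (h1 a (List.mem_cons_self))]
    have e2 : pvStepB ms m F (runs, t2) a = (runs ++ [((a : Int), (pvInnerB ms m a F : Int) - 1)], pvInnerB ms m a F) := by
      simp [pvStepB, Nat.not_lt.mpr (h2 a (List.mem_cons_self))]
    rw [e1, e2]

theorem pvLoopA_eq_fold (d p : List Char) (hm : 1 ≤ p.length) :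
    ∀ fuel i runs, d.length + 1 - i ≤ fuel →
      pvLoopA d p i runs fuel =
        (List.foldl (pvStepB (PySem.Set.ofList (pvMatches d p)) p.length (d.length + 1))
          (runs, i) (msFrom d p i)).1 := by
  intro fuel
  induction fuel with
  | zero =>
    intro i runs hf
    have : d.length ≤ i := by omega
    rw [msFrom_nil d p i this]
    rfl
  | succ f ih =>
    intro i runs hf
    by_cases hi : i < d.length
    · by_cases hP : pvMatchAt d p i = true
      · -- run case
        have hstep : pvInnerA d p i (d.length + 1) = pvInnerA d p (i + p.length) d.length := by
          simp [pvInnerA, hi, hP]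
        obtain ⟨j, hj⟩ : ∃ j, pvInnerA d p i (d.length + 1) = j := ⟨_, rfl⟩
        have hji : i + p.length ≤ j := by
          rw [← hj, hstep]; exact pvInnerA_ge d p d.length (i + p.length)
        have hLHS : pvLoopA d p i runs (f + 1) =
            pvLoopA d p j (runs ++ [((i : Int), (j : Int) - 1)]) f := by
          simp only [pvLoopA]
          rw [if_pos hi, if_pos hP, hj]
        rw [hLHS, ih j (runs ++ [((i : Int), (j : Int) - 1)]) (by omega)]
        -- now compute the RHS fold
        rw [msFrom_cons d p i hi hP]
        simp only [List.foldl_cons]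
        have hTstep : pvStepB (PySem.Set.ofList (pvMatches d p)) p.length (d.length + 1) (runs, i) i =
            (runs ++ [((i : Int), (j : Int) - 1)], j) := by
          simp only [pvStepB]
          rw [if_neg (Nat.lt_irrefl i), pvInnerB_eq_pvInnerA d p (d.length + 1) i, hj]
        rw [hTstep]
        have hskip : List.foldl (pvStepB (PySem.Set.ofList (pvMatches d p)) p.length (d.length + 1))
            (runs ++ [((i : Int), (j : Int) - 1)], j)
            ((List.range d.length).filter
              (fun x => (pvMatchAt d p x && decide (i + 1 ≤ x)) && decide (x < j))) =
            (runs ++ [((i : Int), (j : Int) - 1)], j) := by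
          apply foldl_pvStepB_skip
          intro x hx
          simp only [List.mem_filter, Bool.and_eq_true, decide_eq_true_eq] at hx
          exact hx.2.2
        rw [msFrom_split d p (i + 1) j (by omega), List.foldl_append, hskip]
      · -- no-match case
        have hP' : pvMatchAt d p i = false := by simpa using hP
        have hLHS : pvLoopA d p i runs (f + 1) = pvLoopA d p (i + 1) runs f := by
          simp only [pvLoopA]
          rw [if_pos hi, if_neg (by simp [hP'])]
        rw [hLHS, ih (i + 1) runs (by omega), msFrom_step_nomatch d p i hP']
        exact foldl_pvStepB_t_irrel _ _ _ _ _ _ _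
          (fun x hx => mem_msFrom d p (i + 1) x hx)
          (fun x hx => by have := mem_msFrom d p (i + 1) x hx; omega)
    · have hLHS : pvLoopA d p i runs (f + 1) = runs := by
        simp only [pvLoopA]
        rw [if_neg hi]
      rw [hLHS, msFrom_nil d p i (Nat.not_lt.mp hi)]
      rfl

theorem toList_ne_nil_of_ne_empty (s : String) (h : s ≠ "") : s.toList ≠ [] :=
  fun hnil => h (String.toList_eq_nil_iff.mp hnil)

-- ===== VERDICT (by name: the statement is the Claim_ definition above) =====
theorem find_consecutive_runs_spec : Claim_equal_find_consecutive_runs := by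
  intro data pattern _ hpre
  unfold Spec_find_consecutive_runs
  rcases hpre with hp | hd
  · have hm : 1 ≤ pattern.toList.length :=
      List.length_pos_iff.mpr (toList_ne_nil_of_ne_empty pattern hp)
    unfold find_consecutive_runs find_consecutive_runs_alt
    rw [pvLoopA_eq_fold data.toList pattern.toList hm (data.toList.length + 1) 0 [] (by omega)]
    rw [msFrom_zero]
  · subst hd
    rfl
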